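-- pv_equiv track=rewrite | github.com/das2000sidd/Coursera-Genome-Sequencing | check_eulerian_path.py | out_in_edges
-- ===== SOURCE A (Python) =====
-- def out_in_edges(graph_with_cycle):
-- 	has_cycle=0
-- 	graph_nodes= graph_with_cycle.keys()
-- 	visited=set()
-- 	node_count_dict={}
-- 	for each_node in graph_nodes:
-- 		node_out_degree=len(graph_with_cycle[each_node])
-- 		node_in_degree=0
-- 		for a_node in graph_nodes:
-- 			if each_node in graph_with_cycle[a_node]:
-- 				node_in_degree+=1
-- 		node_count_dict[each_node]=[node_out_degree,node_in_degree]
-- 	return node_count_dict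
-- ===== SOURCE B (Python) =====
-- def out_in_edges(graph_with_cycle):
--     indeg = {node: 0 for node in graph_with_cycle}
--     for adj in graph_with_cycle.values():
--         for t in set(adj):
--             if t in indeg:
--                 indeg[t] += 1
--     return {node: [len(adj), indeg[node]]
--             for node, adj in graph_with_cycle.items()}
-- ===== Notes on version B (the rewrite author's own statement) =====
-- stated objective: faster
-- what changed: A recomputes each node's in-degree by scanning every adjacency list per node (nested loops); B makes one pass over all adjacency lists, incrementing a per-key in-degree counter once per distinct target, and reads out-degree from each list's length.
import Mathlib
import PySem

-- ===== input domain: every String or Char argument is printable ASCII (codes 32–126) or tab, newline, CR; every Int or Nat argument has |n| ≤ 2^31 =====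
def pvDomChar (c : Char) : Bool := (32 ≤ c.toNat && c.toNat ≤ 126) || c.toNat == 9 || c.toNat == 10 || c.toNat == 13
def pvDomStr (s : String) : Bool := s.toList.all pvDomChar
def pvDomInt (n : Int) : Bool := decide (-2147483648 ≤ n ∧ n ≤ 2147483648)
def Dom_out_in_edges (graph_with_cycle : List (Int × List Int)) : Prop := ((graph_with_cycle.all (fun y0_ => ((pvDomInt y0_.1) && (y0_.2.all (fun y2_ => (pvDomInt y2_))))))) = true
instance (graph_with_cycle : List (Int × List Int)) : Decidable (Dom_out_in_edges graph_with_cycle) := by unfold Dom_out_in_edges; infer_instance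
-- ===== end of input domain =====

-- B replaces A's per-node scan of all adjacency lists by one counting pass over all
-- edges (each adjacency list deduplicated, matching A's membership test).

-- ===== PORT A =====
-- graph_with_cycle[k] (Python dict lookup; first matching key of the association list)
def pvGetAdj (g : List (Int × List Int)) (k : Int) : List Int :=
  ((g.find? (fun p => p.1 == k)).map (·.2)).getD []

-- literal transliteration of A: for each node, out-degree = len(adj); in-degree = a loop
-- over all nodes, +1 whenever the node occurs in that node's adjacency list; results put
-- into a dict in key order.  (A's has_cycle / visited are dead code and are dropped.)
def out_in_edges (graph_with_cycle : List (Int × List Int)) : List (Int × List Int) :=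
  let graph_nodes := graph_with_cycle.map (·.1)
  (graph_nodes.foldl (fun d each_node =>
      let node_out_degree : Int := (pvGetAdj graph_with_cycle each_node).length
      let node_in_degree : Int :=
        graph_nodes.foldl (fun c a_node =>
          if each_node ∈ pvGetAdj graph_with_cycle a_node then c + 1 else c) 0
      d.insert each_node [node_out_degree, node_in_degree]) PySem.Dict.empty).items

-- ===== PORT B =====
-- literal transliteration of B: indeg initialised to 0 for every key, one pass over all
-- adjacency lists incrementing indeg[t] for each distinct target t that is a key,
-- then the output assembled directly from the items.
def out_in_edges_alt (graph_with_cycle : List (Int × List Int)) : List (Int × List Int) :=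
  let indeg0 : PySem.Dict Int Int :=
    graph_with_cycle.foldl (fun d p => d.insert p.1 0) PySem.Dict.empty
  let indeg : PySem.Dict Int Int :=
    graph_with_cycle.foldl (fun d p =>
      (PySem.Set.ofList p.2).foldl (fun d t =>
        if d.contains t then d.insert t (d.getD t 0 + 1) else d) d) indeg0
  graph_with_cycle.map (fun p => (p.1, [(p.2.length : Int), indeg.getD p.1 0]))

-- ===== PRECONDITION & SPEC =====
-- The Python argument is a dict, whose keys are necessarily unique; Pre_ states exactly
-- this dict well-formedness of the association-list encoding (no duplicate keys).
def Pre_out_in_edges (graph_with_cycle : List (Int × List Int)) : Prop :=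
  (graph_with_cycle.map (·.1)).Nodup
instance (graph_with_cycle : List (Int × List Int)) : Decidable (Pre_out_in_edges graph_with_cycle) := by unfold Pre_out_in_edges; infer_instance
def pvWitness_out_in_edges : (List (Int × List Int)) := [(1, [2, 2, 3]), (2, [1]), (3, [])]

def Spec_out_in_edges (graph_with_cycle : List (Int × List Int)) (out : List (Int × List Int)) : Prop := out = out_in_edges_alt graph_with_cycle
instance (graph_with_cycle : List (Int × List Int)) (out : List (Int × List Int)) : Decidable (Spec_out_in_edges graph_with_cycle out) := by unfold Spec_out_in_edges; infer_instance

-- ===== CLAIM (what is proved, stated in full; the proofs are below) =====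
def Claim_equal_out_in_edges : Prop := ∀ (graph_with_cycle : List (Int × List Int)), Dom_out_in_edges graph_with_cycle → Pre_out_in_edges graph_with_cycle → Spec_out_in_edges graph_with_cycle (out_in_edges graph_with_cycle)

-- ===== LEMMAS AND PROOFS =====

-- Under nodup keys the dict lookup of a present pair returns that pair's value.
lemma pvGetAdj_mem_aux (g : List (Int × List Int)) :
    (g.map (·.1)).Nodup → ∀ p ∈ g, pvGetAdj g p.1 = p.2 := by
  induction g with
  | nil => intro _ p hp; cases hp
  | cons q t ih =>
    intro hnd p hp
    simp only [List.map_cons, List.nodup_cons] at hnd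
    rcases List.mem_cons.mp hp with hp | hp
    · subst hp; simp [pvGetAdj, List.find?]
    · have hne : q.1 ≠ p.1 := by
        intro h; exact hnd.1 (h ▸ List.mem_map_of_mem hp)
      simpa [pvGetAdj, List.find?, (by simpa using hne : (q.1 == p.1) = false)]
        using ih hnd.2 p hp

lemma pvGetAdj_mem {g : List (Int × List Int)} (hnd : (g.map (·.1)).Nodup)
    {p : Int × List Int} (hp : p ∈ g) : pvGetAdj g p.1 = p.2 :=
  pvGetAdj_mem_aux g hnd p hp

-- contains is preserved by B's inner (dedup) counting fold
lemma contains_inner (s : List Int) (d : PySem.Dict Int Int) (x : Int) :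
    (s.foldl (fun d t => if d.contains t then d.insert t (d.getD t 0 + 1) else d) d).contains x
      = d.contains x := by
  induction s generalizing d with
  | nil => rfl
  | cons t rest ih =>
    simp only [List.foldl_cons]
    by_cases h : d.contains t = true
    · rw [ih, if_pos h, PySem.Dict.contains_insert]
      by_cases hx : x = t
      · subst hx; simp [h]
      · simp [hx]
    · rw [if_neg h, ih]

-- value of B's inner fold: +1 exactly when k occurs in the (nodup) list and is a key
lemma getD_inner (s : List Int) (hs : s.Nodup) (d : PySem.Dict Int Int) (k : Int) :
    (s.foldl (fun d t => if d.contains t then d.insert t (d.getD t 0 + 1) else d) d).getD k 0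
      = d.getD k 0 + (if k ∈ s ∧ d.contains k = true then 1 else 0) := by
  induction s generalizing d with
  | nil => simp
  | cons t rest ih =>
    rcases List.nodup_cons.mp hs with ⟨htr, hrest⟩
    simp only [List.foldl_cons]
    by_cases hct : d.contains t = true
    · rw [if_pos hct, ih hrest]
      have hck : (d.insert t (d.getD t 0 + 1)).contains k = d.contains k := by
        rw [PySem.Dict.contains_insert]
        by_cases hx : k = t
        · subst hx; simp [hct]
        · simp [hx]
      rw [PySem.Dict.getD_insert, hck]
      by_cases hkt : k = t
      · subst hkt; simp [htr, hct]
      · simp [hkt]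
    · rw [if_neg hct, ih hrest]
      by_cases hkt : k = t
      · subst hkt; simp [hct]
      · simp only [List.mem_cons, hkt, false_or]

-- value of B's outer counting fold
lemma getD_outer (g : List (Int × List Int)) (d : PySem.Dict Int Int) (k : Int)
    (hk : d.contains k = true) :
    (g.foldl (fun d p =>
        (PySem.Set.ofList p.2).foldl (fun d t =>
          if d.contains t then d.insert t (d.getD t 0 + 1) else d) d) d).getD k 0
      = d.getD k 0 + (g.countP (fun p => decide (k ∈ p.2)) : Int) := by
  induction g generalizing d with
  | nil => simp
  | cons p rest ih =>
    simp only [List.foldl_cons]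
    set d' := (PySem.Set.ofList p.2).foldl
        (fun d t => if d.contains t then d.insert t (d.getD t 0 + 1) else d) d with hd'
    have hk' : d'.contains k = true := by rw [hd', contains_inner]; exact hk
    rw [ih d' hk', hd', getD_inner _ (PySem.Set.nodup_ofList p.2) d k]
    simp only [PySem.Set.mem_ofList, List.countP_cons]
    by_cases hm : k ∈ p.2
    · simp [hm, hk]; ring
    · simp [hm]

-- initial dict: every key of g is contained
lemma contains_indeg0 (g : List (Int × List Int)) (d : PySem.Dict Int Int) (k : Int) :
    (g.foldl (fun d p => d.insert p.1 (0 : Int)) d).contains k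
      = (d.contains k || decide (k ∈ g.map (·.1))) := by
  induction g generalizing d with
  | nil => simp
  | cons p rest ih =>
    simp only [List.foldl_cons]
    rw [ih, PySem.Dict.contains_insert]
    by_cases hx : k = p.1
    · subst hx; simp
    · have hb : (k == p.1) = false := by simpa using hx
      have hdm : decide (k ∈ List.map (fun x => x.1) (p :: rest))
          = decide (k ∈ List.map (fun x => x.1) rest) :=
        decide_eq_decide.mpr (by simp [List.mem_cons, hx])
      simp only [hb, Bool.false_or]
      rw [hdm]

-- initial dict: every default-0 lookup stays 0
lemma getD_indeg0 (g : List (Int × List Int)) (d : PySem.Dict Int Int) (k : Int)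
    (h : d.getD k 0 = 0) :
    (g.foldl (fun d p => d.insert p.1 (0 : Int)) d).getD k 0 = 0 := by
  induction g generalizing d with
  | nil => exact h
  | cons p rest ih =>
    simp only [List.foldl_cons]
    refine ih _ ?_
    rw [PySem.Dict.getD_insert]
    by_cases hx : k = p.1 <;> simp [hx, h]

-- A's counting loop is countP
lemma foldl_count (l : List (Int × List Int)) (P : Int × List Int → Prop) [DecidablePred P]
    (c0 : Int) :
    l.foldl (fun c q => if P q then c + 1 else c) c0 = c0 + (l.countP (fun q => decide (P q)) : Int) := by
  induction l generalizing c0 with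
  | nil => simp
  | cons q rest ih =>
    simp only [List.foldl_cons, List.countP_cons]
    by_cases h : P q
    · rw [if_pos h, ih]; simp [h]; ring
    · rw [if_neg h, ih]; simp [h]

-- ===== VERDICT (by name: the statement is the Claim_ definition above) =====
theorem out_in_edges_spec : Claim_equal_out_in_edges := by
  intro g _ hpre
  unfold Spec_out_in_edges
  have hnd : (g.map (·.1)).Nodup := hpre
  have lhs_eq : out_in_edges g
      = ((g.map (·.1)).foldl (fun d each_node =>
          d.insert each_node
            [((pvGetAdj g each_node).length : Int),
             (g.map (·.1)).foldl (fun c a_node =>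
               if each_node ∈ pvGetAdj g a_node then c + 1 else c) 0])
          PySem.Dict.empty).items := rfl
  have rhs_eq : out_in_edges_alt g
      = g.map (fun p => (p.1, [(p.2.length : Int),
          (g.foldl (fun d p =>
            (PySem.Set.ofList p.2).foldl (fun d t =>
              if d.contains t then d.insert t (d.getD t 0 + 1) else d) d)
            (g.foldl (fun d p => d.insert p.1 0) PySem.Dict.empty)).getD p.1 0])) := rfl
  rw [lhs_eq, rhs_eq]
  -- A side: the fresh-key insert loop appends items in key order
  have hfresh := PySem.Dict.items_foldl_insert_fresh (g.map (·.1)) (fun a => a)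
      (fun each_node =>
        [((pvGetAdj g each_node).length : Int),
         (g.map (·.1)).foldl (fun c a_node =>
           if each_node ∈ pvGetAdj g a_node then c + 1 else c) 0])
      PySem.Dict.empty (fun a _ => by simp) (by simpa using hnd)
  rw [hfresh]
  simp only [show (PySem.Dict.empty : PySem.Dict Int (List Int)).items = [] from rfl,
    List.nil_append, List.map_map]
  refine List.map_congr_left ?_
  intro p hp
  -- both entries agree at the key p.1
  have hadj : pvGetAdj g p.1 = p.2 := pvGetAdj_mem hnd hp
  have hkey : (p.1 ∈ g.map (·.1)) := List.mem_map_of_mem hp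
  have hcontains :
      (g.foldl (fun d q => d.insert q.1 (0 : Int)) PySem.Dict.empty).contains p.1 = true := by
    rw [contains_indeg0]; simp [hkey]
  have hzero :
      (g.foldl (fun d q => d.insert q.1 (0 : Int)) PySem.Dict.empty).getD p.1 0 = 0 := by
    exact getD_indeg0 g _ p.1 (by simp)
  have hin :
      (g.map (·.1)).foldl (fun c a_node =>
          if p.1 ∈ pvGetAdj g a_node then c + 1 else c) 0
        = (g.countP (fun q => decide (p.1 ∈ q.2)) : Int) := by
    rw [List.foldl_map]
    have hcongr :
        g.foldl (fun c q => if p.1 ∈ pvGetAdj g q.1 then c + 1 else c) (0 : Int)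
          = g.foldl (fun c q => if p.1 ∈ q.2 then c + 1 else c) 0 := by
      apply PySem.List.foldl_congr_mem
      intro c q hq
      rw [pvGetAdj_mem hnd hq]
    rw [hcongr, foldl_count g (fun q => p.1 ∈ q.2) 0]
    simp
  simp only [Function.comp_apply]
  rw [getD_outer _ _ _ hcontains, hzero, hadj, hin]
  simp
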